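-- pv_equiv track=rewrite | github.com/ellion23/durable-python | ege/08/23.py | f
-- ===== SOURCE A (Python) =====
-- def f(n):
--     bn = bin(n)[2:]
--     if n < 4:
--         return 0
--     elif n == 4:
--         return 1
--     elif n > 4 and bn[0] != '1':
--         return f(n-1)
--     else:
--         return f(n-1) + f(int(bn[1:], 2))
-- ===== SOURCE B (Python) =====
-- def f(n):
--     # Bottom-up DP over the recurrence f(k) = f(k-1) + f(k with its top bit cleared)
--     if n < 4:
--         return 0
--     memo = [0, 0, 0, 0, 1]
--     for k in range(5, n + 1):
--         memo.append(memo[k - 1] + memo[k - (1 << (k.bit_length() - 1))])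
--     return memo[n]
-- ===== Notes on version B (the rewrite author's own statement) =====
-- stated objective: faster
-- what changed: Replaces A's exponential un-memoized recursion over binary-string slicing with a bottom-up O(n) DP table, clearing the top bit arithmetically (k - (1 << (bit_length-1))) instead of re-parsing bin(k)[3:]. Pre_ excludes only n >= 997: there A's ~n-frame-deep f(n-1) chain is at/over CPython's default 1000-frame recursion limit (RecursionError in a stock interpreter), and with the limit raised A's exponential recursion does not finish in minutes, so A returns no checkable value.
-- outside the precondition, e.g. on f(997): A does not finish within the time limit, B returns 42005650; on f(1000): A does not finish within the time limit, B returns 44260247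
import Mathlib
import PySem

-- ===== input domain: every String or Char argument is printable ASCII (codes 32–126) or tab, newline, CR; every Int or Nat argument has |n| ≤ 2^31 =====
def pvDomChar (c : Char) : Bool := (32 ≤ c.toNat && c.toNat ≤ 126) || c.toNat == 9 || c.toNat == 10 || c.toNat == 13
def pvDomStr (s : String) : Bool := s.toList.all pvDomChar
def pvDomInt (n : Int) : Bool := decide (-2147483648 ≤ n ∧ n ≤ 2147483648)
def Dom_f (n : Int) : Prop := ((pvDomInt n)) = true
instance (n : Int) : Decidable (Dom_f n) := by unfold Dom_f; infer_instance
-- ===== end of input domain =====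

-- B replaces A's exponential recursion (re-parsing bin(k) strings) by a bottom-up O(n) DP table
-- that clears the top bit arithmetically; measured asymptotically faster.

-- ===== PORT A =====
-- int(s, 2) ported by hand: exact for the nonempty '0'/'1'-digit strings A passes it
-- (PySem.Int.ofCharsBase? hides its digit loop in a private helper that symbolic proofs cannot unfold).
def pbStep (a : Int) (c : Char) : Int := 2 * a + ((c.toNat : Int) - 48)

def parseBin2 (l : List Char) : Int := l.foldl pbStep 0

-- A's recursion, totalised by a fuel counter (fuel n.toNat + 1 always suffices: every recursive
-- argument is smaller, as fAux_ext below proves); the body is A's, branch for branch.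
def fAux : Nat → Int → Int
  | 0, _ => 0
  | (fuel+1), n =>
    let bn := PySem.List.slice (PySem.Int.toBinChars0b n) (some 2) none  -- bn = bin(n)[2:]
    if n < 4 then 0
    else if n = 4 then 1
    else if 4 < n ∧ PySem.List.pyGet? bn 0 ≠ some '1' then fAux fuel (n - 1)
    else fAux fuel (n - 1) + fAux fuel (parseBin2 (PySem.List.slice bn (some 1) none))

def f (n : Int) : Int := fAux (n.toNat + 1) n

-- ===== PORT B =====
def f_alt (n : Int) : Int :=
  if n < 4 then 0
  else
    let memo : List Int := [0, 0, 0, 0, 1]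
    let memo := (PySem.List.pyRange 5 (n + 1) 1).foldl
      (fun (m : List Int) (k : Int) => m ++ [PySem.List.pyGetD m (k - 1) 0 +
        PySem.List.pyGetD m (k - (1 <<< (PySem.Int.bitLength k - 1))) 0]) memo
    PySem.List.pyGetD memo n 0

-- ===== PRECONDITION & SPEC =====
-- Pre_ excludes exactly n >= 997: there A's ~n-frame-deep f(n-1) chain is at/over CPython's
-- default 1000-frame recursion limit (RecursionError in a stock interpreter; the exact onset in
-- 997..1004 is C-stack-dependent), and with the limit raised A's exponential un-memoized
-- recursion does not finish within the measurement budget, so A returns no checkable value.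
def Pre_f (n : Int) : Prop := n < 997
instance (n : Int) : Decidable (Pre_f n) := by unfold Pre_f; infer_instance
def pvWitness_f : Int := 5

def Spec_f (n : Int) (out : Int) : Prop := out = f_alt n
instance (n : Int) (out : Int) : Decidable (Spec_f n out) := by unfold Spec_f; infer_instance

-- ===== CLAIM (what is proved, stated in full; the proofs are below) =====
def Claim_equal_f : Prop := ∀ (n : Int), Dom_f n → Pre_f n → Spec_f n (f n)

-- ===== LEMMAS AND PROOFS =====
-- proof-side helpers needed by f's termination argument ------------------------------------------
-- binAux mirrors core's Nat.toDigitsCore (base 2) without fuel, for reasoning only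
def binAux (n : Nat) (acc : List Char) : List Char :=
  if h : n = 0 then acc else binAux (n / 2) (Nat.digitChar (n % 2) :: acc)
termination_by n
decreasing_by exact Nat.div_lt_self (Nat.pos_of_ne_zero h) (by norm_num)

lemma toDigitsCore_eq_binAux : ∀ (f n : Nat) (acc : List Char), 0 < n → n < f →
    Nat.toDigitsCore 2 f n acc = binAux n acc := by
  intro f
  induction f with
  | zero => omega
  | succ f ih =>
    intro n acc hn hf
    rw [binAux]
    rw [dif_neg (by omega : ¬ n = 0)]
    simp only [Nat.toDigitsCore]
    by_cases h2 : n / 2 = 0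
    · rw [if_pos h2, h2, binAux]
      simp
    · rw [if_neg h2]
      exact ih (n / 2) _ (by omega) (by omega)

lemma pbStep_affine (l : List Char) (hd : ∀ c ∈ l, c = '0' ∨ c = '1') :
    (∀ a : Int, l.foldl pbStep a = a * 2 ^ l.length + l.foldl pbStep 0) ∧
    0 ≤ l.foldl pbStep 0 ∧ l.foldl pbStep 0 < 2 ^ l.length := by
  induction l with
  | nil => simp
  | cons c t ih =>
    have hc : ((c.toNat : Int) - 48) = 0 ∨ ((c.toNat : Int) - 48) = 1 := by
      rcases hd c (by simp) with h | h <;> subst h <;> [left; right] <;> rfl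
    obtain ⟨iha, ihnn, ihlt⟩ := ih (fun d hdm => hd d (by simp [hdm]))
    have key : ∀ a : Int, (c :: t).foldl pbStep a
        = a * 2 ^ (c :: t).length + (c :: t).foldl pbStep 0 := by
      intro a
      simp only [List.foldl_cons, List.length_cons]
      rw [iha (pbStep a c), iha (pbStep 0 c)]
      simp only [pbStep, pow_succ]
      ring
    refine ⟨key, ?_, ?_⟩
    · simp only [List.foldl_cons]
      rw [iha (pbStep 0 c)]
      simp only [pbStep]
      rcases hc with h | h <;> rw [h] <;>
        nlinarith [pow_pos (by norm_num : (0:Int) < 2) t.length]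
    · simp only [List.foldl_cons, List.length_cons]
      rw [iha (pbStep 0 c)]
      simp only [pbStep, pow_succ]
      rcases hc with h | h <;> rw [h] <;> nlinarith

lemma binAux_spec (n : Nat) : 0 < n → ∀ acc, ∃ t, binAux n acc = t ++ acc ∧
    t.head? = some '1' ∧ (∀ c ∈ t, c = '0' ∨ c = '1') ∧
    ∀ a : Int, t.foldl pbStep a = a * 2 ^ t.length + (n : Int) := by
  induction n using Nat.strong_induction_on with
  | _ n ih =>
  intro hn acc
  rw [binAux, dif_neg (by omega : ¬ n = 0)]
  have hmod : n % 2 = 0 ∨ n % 2 = 1 := by omega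
  have hcd : Nat.digitChar (n % 2) = '0' ∨ Nat.digitChar (n % 2) = '1' := by
    rcases hmod with h | h <;> rw [h] <;> [left; right] <;> rfl
  have hcv : ((Nat.digitChar (n % 2)).toNat : Int) - 48 = (n % 2 : Nat) := by
    rcases hmod with h | h <;> rw [h] <;> rfl
  by_cases h2 : n / 2 = 0
  · have hn1 : n = 1 := by omega
    refine ⟨[Nat.digitChar (n % 2)], ?_, ?_, ?_, ?_⟩
    · rw [h2, binAux]; simp
    · subst hn1; rfl
    · intro c hc; simp at hc; rw [hc]; exact hcd
    · intro a
      simp only [List.foldl_cons, List.foldl_nil, List.length_cons, List.length_nil, pbStep]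
      rw [hcv]
      subst hn1; push_cast; ring
  · obtain ⟨t', heq, hhead, hdig, hfold⟩ := ih (n / 2) (by omega) (by omega) (Nat.digitChar (n % 2) :: acc)
    have ht'ne : t' ≠ [] := by intro h; rw [h] at hhead; simp at hhead
    refine ⟨t' ++ [Nat.digitChar (n % 2)], ?_, ?_, ?_, ?_⟩
    · rw [heq]; simp
    · rw [List.head?_append_of_ne_nil _ ht'ne]; exact hhead
    · intro c hc
      rcases List.mem_append.mp hc with h | h
      · exact hdig c h
      · simp at h; rw [h]; exact hcd
    · intro a
      rw [List.foldl_append, hfold a]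
      simp only [List.foldl_cons, List.foldl_nil, List.length_append, List.length_cons,
        List.length_nil, pbStep]
      rw [hcv]
      have hsplit : (n : Int) = 2 * ((n / 2 : Nat) : Int) + ((n % 2 : Nat) : Int) := by
        push_cast; omega
      rw [pow_add]
      rw [hsplit]
      ring

-- the three facts about bin(n)[2:] that f's recursion rests on
lemma bin_parse (n : Int) (h : 4 < n) :
    PySem.List.pyGet? (PySem.List.slice (PySem.Int.toBinChars0b n) (some 2) none) 0 = some '1' ∧
    parseBin2 (PySem.List.slice (PySem.List.slice (PySem.Int.toBinChars0b n) (some 2) none) (some 1) none)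
      = n - 2 ^ (PySem.Int.bitLength n - 1) ∧
    0 ≤ n - 2 ^ (PySem.Int.bitLength n - 1) ∧ n - 2 ^ (PySem.Int.bitLength n - 1) < n := by
  have hm : n = ((n.toNat : Nat) : Int) := by omega
  have hm4 : 4 < n.toNat := by omega
  have hbin : PySem.Int.toBinChars0b n = '0' :: 'b' :: Nat.toDigits 2 n.toNat := by
    unfold PySem.Int.toBinChars0b
    rw [if_neg (by omega)]
  have hdrop : PySem.List.slice (PySem.Int.toBinChars0b n) (some 2) none
      = Nat.toDigits 2 n.toNat := by
    rw [hbin, PySem.List.slice_from _ (by norm_num)]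
    rfl
  have htd : Nat.toDigits 2 n.toNat = binAux n.toNat [] := by
    unfold Nat.toDigits
    exact toDigitsCore_eq_binAux (n.toNat + 1) n.toNat [] (by omega) (by omega)
  obtain ⟨t, ht, hhead, hdig, hfold⟩ := binAux_spec n.toNat (by omega) []
  rw [List.append_nil] at ht
  obtain ⟨rest, hrest⟩ : ∃ rest, t = '1' :: rest := by
    cases t with
    | nil => simp at hhead
    | cons c r =>
      simp at hhead
      exact ⟨r, by rw [hhead]⟩
  obtain ⟨aff, hP0, hPlt⟩ := pbStep_affine rest (fun c hc => hdig c (by rw [hrest]; simp [hc]))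
  have hfold0 := hfold 0
  rw [hrest] at hfold0
  simp only [List.foldl_cons, List.length_cons] at hfold0
  have hstep01 : pbStep 0 '1' = 1 := by decide
  rw [hstep01, aff 1] at hfold0
  have hval : List.foldl pbStep 0 rest = (n.toNat : Int) - 2 ^ rest.length := by
    rw [one_mul, zero_mul, zero_add] at hfold0
    omega
  have hnatAbs : n.natAbs = n.toNat := by omega
  have h3 : 2 ^ (PySem.Int.bitLength n - 1) ≤ n.toNat := by
    rw [← hnatAbs]
    exact PySem.Int.two_pow_bitLength_le n (by omega)
  have h4 : n.toNat < 2 ^ PySem.Int.bitLength n := by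
    rw [← hnatAbs]
    exact PySem.Int.lt_two_pow_bitLength n
  have h1 : 2 ^ rest.length ≤ n.toNat := by
    have : ((2 ^ rest.length : Nat) : Int) ≤ ((n.toNat : Nat) : Int) := by push_cast; omega
    exact_mod_cast this
  have h2 : n.toNat < 2 ^ (rest.length + 1) := by
    have : ((n.toNat : Nat) : Int) < ((2 ^ (rest.length + 1) : Nat) : Int) := by
      push_cast [pow_succ]; omega
    exact_mod_cast this
  have hbL : PySem.Int.bitLength n = rest.length + 1 := by
    have ha : PySem.Int.bitLength n - 1 < rest.length + 1 :=
      (Nat.pow_lt_pow_iff_right (by norm_num)).mp (lt_of_le_of_lt h3 h2)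
    have hb : rest.length < PySem.Int.bitLength n :=
      (Nat.pow_lt_pow_iff_right (by norm_num)).mp (lt_of_le_of_lt h1 h4)
    omega
  have hpow : ((2 : Int) ^ (PySem.Int.bitLength n - 1)) = 2 ^ rest.length := by
    rw [hbL]
    norm_num
  refine ⟨?_, ?_, ?_, ?_⟩
  · rw [hdrop, htd, ht, hrest]
    exact PySem.List.pyGet?_zero_cons _ _
  · rw [hdrop, htd, ht, hrest, PySem.List.slice_from_one]
    show List.foldl pbStep 0 rest = n - 2 ^ (PySem.Int.bitLength n - 1)
    rw [hval, hpow]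
    omega
  · rw [hpow, hm]
    omega
  · rw [hpow]
    have : (0:Int) < 2 ^ rest.length := pow_pos (by norm_num) _
    omega
-- end of proof-side helpers ----------------------------------------------------------------------

-- any two sufficient fuels give fAux the same value
lemma fAux_ext (k : Nat) : ∀ (n : Int), n.toNat = k → ∀ f1 f2 : Nat, k < f1 → k < f2 →
    fAux f1 n = fAux f2 n := by
  induction k using Nat.strong_induction_on with
  | _ k ih =>
  intro n hk f1 f2 h1 h2
  obtain ⟨a, rfl⟩ : ∃ a, f1 = a + 1 := ⟨f1 - 1, by omega⟩
  obtain ⟨b, rfl⟩ : ∃ b, f2 = b + 1 := ⟨f2 - 1, by omega⟩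
  simp only [fAux]
  by_cases hlt : n < 4
  · simp [hlt]
  · by_cases heq : n = 4
    · simp [heq]
    · have h4 : 4 < n := by omega
      obtain ⟨hg, hp, hm0, hmlt⟩ := bin_parse n h4
      rw [if_neg hlt, if_neg hlt, if_neg heq, if_neg heq,
        if_neg (by simp [hg]), if_neg (by simp [hg]), hp]
      have e1 : fAux a (n - 1) = fAux b (n - 1) := by
        rcases Nat.lt_or_ge (n - 1).toNat k with h | h
        · exact ih _ h _ rfl _ _ (by omega) (by omega)
        · have : (n - 1).toNat = k - 1 := by omega
          exact ih (k - 1) (by omega) _ this _ _ (by omega) (by omega)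
      have e2 : fAux a (n - 2 ^ (PySem.Int.bitLength n - 1))
          = fAux b (n - 2 ^ (PySem.Int.bitLength n - 1)) := by
        have hmk : (n - 2 ^ (PySem.Int.bitLength n - 1)).toNat < k := by omega
        exact ih _ hmk _ rfl _ _ (by omega) (by omega)
      rw [e1, e2]

lemma f_small (n : Int) (h : n < 4) : f n = 0 := by
  unfold f
  simp only [fAux]
  simp [h]

lemma f_four : f 4 = 1 := by
  unfold f
  simp only [fAux]
  norm_num

lemma f_rec (n : Int) (h : 4 < n) :
    f n = f (n - 1) + f (n - 2 ^ (PySem.Int.bitLength n - 1)) := by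
  obtain ⟨hg, hp, hm0, hmlt⟩ := bin_parse n h
  unfold f
  simp only [fAux]
  rw [if_neg (by omega), if_neg (by omega), if_neg (by simp [hg]), hp]
  have hpos : (0:Int) < 2 ^ (PySem.Int.bitLength n - 1) := pow_pos (by norm_num) _
  congr 1
  · exact fAux_ext (n - 1).toNat (n - 1) rfl n.toNat ((n - 1).toNat + 1) (by omega) (by omega)
  · exact fAux_ext (n - 2 ^ (PySem.Int.bitLength n - 1)).toNat
      (n - 2 ^ (PySem.Int.bitLength n - 1)) rfl n.toNat
      ((n - 2 ^ (PySem.Int.bitLength n - 1)).toNat + 1) (by omega) (by omega)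

lemma memo_invariant (N : Nat) (hN : 4 ≤ N) :
    (PySem.List.pyRange 5 ((N : Int) + 1) 1).foldl
      (fun (m : List Int) (k : Int) => m ++ [PySem.List.pyGetD m (k - 1) 0 +
        PySem.List.pyGetD m (k - (1 <<< (PySem.Int.bitLength k - 1))) 0]) [0, 0, 0, 0, 1]
    = (List.range (N + 1)).map (fun i : Nat => f (i : Int)) := by
  induction N, hN using Nat.le_induction with
  | base =>
    rw [show ((4 : Nat) : Int) + 1 = 5 by norm_num, PySem.List.pyRange_one_eq_nil (by norm_num)]
    simp only [List.foldl_nil]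
    simp [List.range_succ, f_small, f_four]
  | succ N hN ih =>
    have hsucc : ((N + 1 : Nat) : Int) + 1 = ((N : Int) + 1) + 1 := by push_cast; ring
    rw [hsucc, PySem.List.pyRange_one_succ_right (by omega), List.foldl_append, ih]
    simp only [List.foldl_cons, List.foldl_nil]
    push_cast
    set prev := (List.range (N + 1)).map (fun i : Nat => f (i : Int)) with hprev
    have hlen : prev.length = N + 1 := by simp [hprev]
    have hb := bin_parse ((N : Int) + 1) (by omega)
    have hshift : ((1 : Int) <<< (PySem.Int.bitLength ((N : Int) + 1) - 1))
        = 2 ^ (PySem.Int.bitLength ((N : Int) + 1) - 1) := by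
      rw [Int.shiftLeft_eq]; ring
    have hg1 : PySem.List.pyGetD prev ((N : Int) + 1 - 1) 0 = f (N : Int) := by
      rw [show ((N : Int) + 1 - 1) = ((N : Nat) : Int) by ring, PySem.List.pyGetD_natCast,
        PySem.List.getD_map_range _ _ _ _ (by omega)]
    have he0 : 0 ≤ (N : Int) + 1 - 2 ^ (PySem.Int.bitLength ((N : Int) + 1) - 1) := hb.2.2.1
    have he1 : (N : Int) + 1 - 2 ^ (PySem.Int.bitLength ((N : Int) + 1) - 1) < (N : Int) + 1 :=
      hb.2.2.2
    have hg2 : PySem.List.pyGetD prev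
        ((N : Int) + 1 - (1 : Int) <<< (PySem.Int.bitLength ((N : Int) + 1) - 1)) 0
        = f ((N : Int) + 1 - 2 ^ (PySem.Int.bitLength ((N : Int) + 1) - 1)) := by
      rw [hshift, PySem.List.pyGetD_eq_getElem _ _ he0 (by rw [hlen]; push_cast; omega)]
      simp only [hprev, List.getElem_map, List.getElem_range]
      congr 1
      omega
    rw [List.range_succ, List.map_append, List.map_cons, List.map_nil]
    congr 1
    rw [hg1, hg2]
    push_cast
    rw [f_rec ((N : Int) + 1) (by omega)]
    norm_num

-- ===== VERDICT (by name: the statement is the Claim_ definition above) =====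
theorem f_spec : Claim_equal_f := by
  intro n _ _
  unfold Spec_f f_alt
  by_cases h : n < 4
  · simp [h, f_small n h]
  · simp only [if_neg h]
    have h4 : 4 ≤ n := by omega
    have hn : n = ((n.toNat : Nat) : Int) := by omega
    rw [hn, memo_invariant n.toNat (by omega), PySem.List.pyGetD_natCast,
      List.getD_eq_getElem?_getD, List.getElem?_map, List.getElem?_range (by omega)]
    rfl
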